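-- pv_equiv track=rewrite | github.com/ryeongse25/algorithm | 프로그래머스/unrated/181837. 커피 심부름/커피 심부름.py | solution
-- ===== SOURCE A (Python) =====
-- def solution(order):
--     answer = 0
--
--     for coffee in order:
--         if 'cafelatte' in coffee:
--             answer += 5000
--         else:
--             answer += 4500
--
--     return answer
-- ===== SOURCE B (Python) =====
-- def solution(order):
--     if not order:
--         return 0
--     if len(order) == 1:
--         return 5000 if 'cafelatte' in order[0] else 4500
--     mid = len(order) // 2
--     return solution(order[:mid]) + solution(order[mid:])
-- ===== Notes on version B (the rewrite author's own statement) =====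
-- stated objective: alternative
-- what changed: Replaces A's single left-to-right branching accumulator loop with a divide-and-conquer recursion that splits the order list in half, prices singletons directly, and sums the two halves; correctness relies on the pricing being additive over list concatenation.
import Mathlib
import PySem

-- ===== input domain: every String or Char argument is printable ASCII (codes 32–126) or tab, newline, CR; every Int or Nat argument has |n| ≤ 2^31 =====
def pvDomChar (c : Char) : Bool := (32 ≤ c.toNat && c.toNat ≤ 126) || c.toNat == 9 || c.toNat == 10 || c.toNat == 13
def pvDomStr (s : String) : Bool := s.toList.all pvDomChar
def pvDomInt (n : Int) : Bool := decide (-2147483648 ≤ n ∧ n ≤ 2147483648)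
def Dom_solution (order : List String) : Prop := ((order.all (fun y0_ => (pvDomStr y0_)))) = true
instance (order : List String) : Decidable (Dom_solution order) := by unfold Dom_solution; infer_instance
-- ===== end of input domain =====

-- B replaces A's branching accumulator loop by a divide-and-conquer recursion (split in half, price singletons, add); objective: alternative.


-- ===== PORT A =====
def solution (order : List String) : Int :=
  order.foldl (fun answer coffee =>
    if PySem.Str.isIn "cafelatte" coffee then answer + 5000 else answer + 4500) 0

-- ===== PORT B =====
-- order[:mid] / order[mid:] with 0 ≤ mid ≤ len are exactly take/drop (PySem.List.slice_to_natCast / slice_from_natCast).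
def solution_alt : (order : List String) → Int
  | [] => 0
  | [x] => if PySem.Str.isIn "cafelatte" x then 5000 else 4500
  | x :: y :: rest =>
    let order := x :: y :: rest
    let mid := order.length / 2
    solution_alt (order.take mid) + solution_alt (order.drop mid)
termination_by order => order.length
decreasing_by all_goals (simp only [List.length_take, List.length_drop, List.length_cons]; omega)

-- ===== PRECONDITION & SPEC =====
def Spec_solution (order : List String) (out : Int) : Prop := out = solution_alt order
instance (order : List String) (out : Int) : Decidable (Spec_solution order out) := by unfold Spec_solution; infer_instance

-- ===== CLAIM (what is proved, stated in full; the proofs are below) =====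
def Claim_equal_solution : Prop := ∀ (order : List String), Dom_solution order → Spec_solution order (solution order)

-- ===== LEMMAS AND PROOFS =====
theorem solution_foldl_shift (order : List String) (a : Int) :
    order.foldl (fun answer coffee =>
      if PySem.Str.isIn "cafelatte" coffee then answer + 5000 else answer + 4500) a
      = a + solution order := by
  induction order generalizing a with
  | nil => simp [solution]
  | cons x xs ih =>
    simp only [solution, List.foldl_cons]
    rw [ih, ih]
    split_ifs <;> ring

theorem solution_append (l1 l2 : List String) :
    solution (l1 ++ l2) = solution l1 + solution l2 := by
  simp only [solution, List.foldl_append]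
  rw [solution_foldl_shift]
  rfl

theorem alt_eq (order : List String) : solution_alt order = solution order := by
  fun_induction solution_alt order with
  | case1 => simp [solution]
  | case2 x h => simp_all [solution, PySem.Str.isIn]
  | case3 x h => simp_all [solution, PySem.Str.isIn]
  | case4 x y rest ord mid ih1 ih2 =>
    rw [ih1, ih2, ← solution_append, List.take_append_drop]

theorem solution_spec : Claim_equal_solution := by
  intro order _
  unfold Spec_solution
  exact (alt_eq order).symm
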